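-- pv_equiv track=rewrite | github.com/radup/fin-good | backend/app/services/content_sanitizer.py | _sanitize_structure
-- ===== SOURCE A (Python) =====
-- from typing import Dict, List, Optional, Tuple, Any, Union
--
-- def _sanitize_structure(content: str) -> Tuple[str, List[str]]:
--     """Sanitize CSV structure and line endings"""
--
--     modifications = []
--
--     # Normalize line endings
--     normalized = content.replace('\r\n', '\n').replace('\r', '\n')
--     if normalized != content:
--         modifications.append("Normalized line endings")
--
--     # Remove excessive blank lines
--     lines = normalized.split('\n')
--     filtered_lines = []
--     consecutive_empty = 0
--
--     for line in lines:
--         if line.strip() == '':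
--             consecutive_empty += 1
--             if consecutive_empty <= 2:  # Allow up to 2 consecutive empty lines
--                 filtered_lines.append(line)
--         else:
--             consecutive_empty = 0
--             filtered_lines.append(line)
--
--     if len(filtered_lines) != len(lines):
--         modifications.append("Removed excessive blank lines")
--
--     # Limit line length to prevent buffer overflow attacks
--     max_line_length = 10000
--     truncated_lines = []
--     for line in filtered_lines:
--         if len(line) > max_line_length:
--             truncated_lines.append(line[:max_line_length])
--             modifications.append(f"Truncated line exceeding {max_line_length} characters")
--         else:
--             truncated_lines.append(line)
--
--     return '\n'.join(truncated_lines), modifications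
-- ===== SOURCE B (Python) =====
-- def _sanitize_structure(content: str):
--     """Run-based rewrite: group consecutive blank lines by index scanning and cap each
--     run at 2; truncation counted, messages produced by list multiplication."""
--     normalized = content.replace('\r\n', '\n').replace('\r', '\n')
--     lines = normalized.split('\n')
--     kept = []
--     i = 0
--     n = len(lines)
--     while i < n:
--         if lines[i].strip() == '':
--             j = i
--             while j < n and lines[j].strip() == '':
--                 j += 1
--             kept.extend(lines[i:min(i + 2, j)])  # keep at most 2 lines of each blank run
--             i = j
--         else:
--             kept.append(lines[i])
--             i += 1
--     long_count = sum(1 for l in kept if len(l) > 10000)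
--     modifications = []
--     if normalized != content:
--         modifications.append("Normalized line endings")
--     if len(kept) != n:
--         modifications.append("Removed excessive blank lines")
--     modifications += ["Truncated line exceeding 10000 characters"] * long_count
--     return '\n'.join(l[:10000] if len(l) > 10000 else l for l in kept), modifications
-- ===== Notes on version B (the rewrite author's own statement) =====
-- stated objective: alternative
-- what changed: Replaces A's per-line consecutive_empty counter with a run-based index scan that groups each maximal blank-line run and keeps its first two lines, and replaces A's per-line truncation-message appends with a single count of over-long kept lines whose message list is built by list multiplication.
import Mathlib
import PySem

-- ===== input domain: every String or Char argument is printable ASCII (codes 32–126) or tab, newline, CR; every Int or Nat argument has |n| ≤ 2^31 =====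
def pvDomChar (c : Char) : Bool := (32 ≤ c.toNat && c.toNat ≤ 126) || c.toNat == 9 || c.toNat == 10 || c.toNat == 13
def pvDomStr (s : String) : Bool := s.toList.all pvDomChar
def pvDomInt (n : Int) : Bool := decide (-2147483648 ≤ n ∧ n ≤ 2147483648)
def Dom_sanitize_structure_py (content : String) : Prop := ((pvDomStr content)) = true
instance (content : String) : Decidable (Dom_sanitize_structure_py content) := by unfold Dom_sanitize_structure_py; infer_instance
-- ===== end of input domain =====

-- B groups maximal blank-line runs (keeping the first two of each run) instead of A's
-- consecutive_empty counter, and builds the truncation messages from a count; same result.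

-- ===== PORT A =====
-- A's first loop: drop blank lines after 2 consecutive ones (consecutive_empty counter)
def pvAFilter (ce : Nat) : List String → List String
  | [] => []
  | l :: rest =>
    if PySem.Str.strip l = "" then
      if ce + 1 ≤ 2 then l :: pvAFilter (ce + 1) rest else pvAFilter (ce + 1) rest
    else l :: pvAFilter 0 rest

-- A's second loop: truncate long lines, collecting the per-line messages
def pvATrunc : List String → List String × List String
  | [] => ([], [])
  | l :: rest =>
    if PySem.Str.len l > 10000 then
      (PySem.Str.slice l none (some 10000) :: (pvATrunc rest).1,
       "Truncated line exceeding 10000 characters" :: (pvATrunc rest).2)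
    else (l :: (pvATrunc rest).1, (pvATrunc rest).2)

def sanitize_structure_py (content : String) : String × List String :=
  let normalized := PySem.Str.replace (PySem.Str.replace content "\r\n" "\n") "\r" "\n"
  let mods0 : List String := if normalized ≠ content then ["Normalized line endings"] else []
  let lines := (PySem.Str.split? normalized "\n").getD []  -- s.split('\n'); sep nonempty so split? is some
  let filtered := pvAFilter 0 lines
  let mods1 := mods0 ++ (if filtered.length ≠ lines.length then ["Removed excessive blank lines"] else [])
  let tm := pvATrunc filtered
  (PySem.Str.join "\n" tm.1, mods1 ++ tm.2)

-- ===== PORT B =====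
def pvBBlank (l : String) : Bool := PySem.Str.strip l = ""

-- B's outer while loop over indices: at a blank line, the inner while finds the end of
-- the blank run (takeWhile/dropWhile), and lines[i:min(i+2,j)] is the run's first 2 lines
def pvBRuns : List String → List String
  | [] => []
  | l :: rest =>
    if pvBBlank l then
      (l :: rest.takeWhile pvBBlank).take 2 ++ pvBRuns (rest.dropWhile pvBBlank)
    else l :: pvBRuns rest
termination_by ls => ls.length
decreasing_by
  · simpa using Nat.lt_succ_of_le (List.length_dropWhile_le pvBBlank rest)
  · simp

def sanitize_structure_py_alt (content : String) : String × List String :=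
  let normalized := PySem.Str.replace (PySem.Str.replace content "\r\n" "\n") "\r" "\n"
  let lines := (PySem.Str.split? normalized "\n").getD []  -- s.split('\n'); sep nonempty so split? is some
  let kept := pvBRuns lines
  let longCount := kept.countP (fun l => decide (PySem.Str.len l > 10000))
  let mods := (if normalized ≠ content then ["Normalized line endings"] else [])
    ++ (if kept.length ≠ lines.length then ["Removed excessive blank lines"] else [])
    ++ List.replicate longCount "Truncated line exceeding 10000 characters"
  (PySem.Str.join "\n" (kept.map (fun l => if PySem.Str.len l > 10000 then PySem.Str.slice l none (some 10000) else l)), mods)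

-- ===== PRECONDITION & SPEC =====
def Spec_sanitize_structure_py (content : String) (out : String × List String) : Prop := out = sanitize_structure_py_alt content
instance (content : String) (out : String × List String) : Decidable (Spec_sanitize_structure_py content out) := by unfold Spec_sanitize_structure_py; infer_instance

-- ===== CLAIM (what is proved, stated in full; the proofs are below) =====
def Claim_equal_sanitize_structure_py : Prop := ∀ (content : String), Dom_sanitize_structure_py content → Spec_sanitize_structure_py content (sanitize_structure_py content)

-- ===== LEMMAS AND PROOFS =====

-- A's counter pass, from any counter value, keeps 2-ce lines of the leading blank run and restarts after it
theorem pvAFilter_run (rest : List String) : ∀ ce : Nat,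
    pvAFilter ce rest = (rest.takeWhile pvBBlank).take (2 - ce) ++ pvAFilter 0 (rest.dropWhile pvBBlank) := by
  induction rest with
  | nil => intro ce; simp [pvAFilter]
  | cons l r ih =>
    intro ce
    by_cases h : pvBBlank l
    · have hs : PySem.Str.strip l = "" := by simpa [pvBBlank] using h
      simp only [pvAFilter, hs, List.takeWhile_cons, List.dropWhile_cons, h, if_pos]
      by_cases hce : ce + 1 ≤ 2
      · rw [if_pos hce, ih (ce + 1)]
        have : 2 - ce = (2 - (ce + 1)) + 1 := by omega
        simp [this]
      · rw [if_neg hce, ih (ce + 1)]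
        have h1 : 2 - ce = 0 := by omega
        have h2 : 2 - (ce + 1) = 0 := by omega
        simp [h1, h2]
    · have hs : ¬ PySem.Str.strip l = "" := by simpa [pvBBlank] using h
      simp only [List.takeWhile_cons, List.dropWhile_cons, h]
      simp [pvAFilter, hs]

-- B's run grouping equals A's counter pass started at 0
theorem pvBRuns_eq (n : Nat) : ∀ lines : List String, lines.length ≤ n → pvBRuns lines = pvAFilter 0 lines := by
  induction n with
  | zero =>
    intro lines h
    cases lines with
    | nil => simp [pvBRuns, pvAFilter]
    | cons l rest => simp at h
  | succ n ih =>
    intro lines h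
    cases lines with
    | nil => simp [pvBRuns, pvAFilter]
    | cons l rest =>
      have hr : rest.length ≤ n := by simpa using h
      by_cases hb : pvBBlank l
      · have hs : PySem.Str.strip l = "" := by simpa [pvBBlank] using hb
        have hA : pvAFilter 0 (l :: rest) = l :: pvAFilter 1 rest := by simp [pvAFilter, hs]
        rw [pvBRuns, if_pos hb, hA, pvAFilter_run rest 1,
          ih _ (le_trans (List.length_dropWhile_le pvBBlank rest) hr)]
        simp [List.take_succ_cons]
      · have hs : ¬ PySem.Str.strip l = "" := by simpa [pvBBlank] using hb
        rw [pvBRuns, if_neg hb, ih rest hr]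
        simp [pvAFilter, hs]

-- A's truncation loop, split into its two components
theorem pvATrunc_fst (f : List String) :
    (pvATrunc f).1 = f.map (fun l => if PySem.Str.len l > 10000 then PySem.Str.slice l none (some 10000) else l) := by
  induction f with
  | nil => rfl
  | cons l rest ih =>
    by_cases h : PySem.Str.len l > 10000
    · simp only [pvATrunc, if_pos h, List.map_cons, ih]
    · simp only [pvATrunc, if_neg h, List.map_cons, ih]

theorem pvATrunc_snd (f : List String) :
    (pvATrunc f).2 = List.replicate (f.countP (fun l => decide (PySem.Str.len l > 10000))) "Truncated line exceeding 10000 characters" := by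
  induction f with
  | nil => rfl
  | cons l rest ih =>
    by_cases h : PySem.Str.len l > 10000
    · simp only [pvATrunc, if_pos h, List.countP_cons, ih]
      have h' : 10000 < l.length := by rw [PySem.Str.len_eq] at h; exact_mod_cast (by simpa using h)
      simp [h', List.replicate_succ]
    · simp only [pvATrunc, if_neg h, List.countP_cons, ih]
      rw [PySem.Str.len_eq] at h
      simp [Nat.not_lt.mp (by simpa using h)]

-- ===== VERDICT (by name: the statement is the Claim_ definition above) =====
theorem sanitize_structure_py_spec : Claim_equal_sanitize_structure_py := by
  intro content _
  unfold Spec_sanitize_structure_py sanitize_structure_py sanitize_structure_py_alt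
  simp only [← pvBRuns_eq _ _ (le_refl _), pvATrunc_fst, pvATrunc_snd,
    List.append_assoc]
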